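-- pv_equiv track=rewrite | github.com/Philipjj609/puzzle_generator | task3_specialized/nerdle_generator.py | _has_leading_zero
-- ===== SOURCE A (Python) =====
-- def _has_leading_zero(expr: str) -> bool:
--     """Detect multi-digit tokens that start with 0."""
--     i = 0
--     while i < len(expr):
--         if expr[i].isdigit():
--             j = i
--             while j < len(expr) and expr[j].isdigit():
--                 j += 1
--             token = expr[i:j]
--             if len(token) > 1 and token[0] == "0":
--                 return True
--             i = j
--         else:
--             i += 1
--     return False
-- ===== SOURCE B (Python) =====
-- def _has_leading_zero(expr: str) -> bool:
--     """Detect multi-digit tokens that start with 0.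
--
--     A position k starts an offending token exactly when it holds '0', the
--     next character is a digit, and it is not preceded by a digit.
--     """
--     n = len(expr)
--     return any(
--         expr[k] == "0"
--         and expr[k + 1].isdigit()
--         and (k == 0 or not expr[k - 1].isdigit())
--         for k in range(n - 1)
--     )
-- ===== Notes on version B (the rewrite author's own statement) =====
-- stated objective: simpler
-- what changed: Replaced the nested index-scanning while loops that extract each maximal digit run into a token with a single positional predicate (one comprehension, no inner loop, no token slicing): any position holding '0' that is followed by a digit and not preceded by a digit.
import Mathlib
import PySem

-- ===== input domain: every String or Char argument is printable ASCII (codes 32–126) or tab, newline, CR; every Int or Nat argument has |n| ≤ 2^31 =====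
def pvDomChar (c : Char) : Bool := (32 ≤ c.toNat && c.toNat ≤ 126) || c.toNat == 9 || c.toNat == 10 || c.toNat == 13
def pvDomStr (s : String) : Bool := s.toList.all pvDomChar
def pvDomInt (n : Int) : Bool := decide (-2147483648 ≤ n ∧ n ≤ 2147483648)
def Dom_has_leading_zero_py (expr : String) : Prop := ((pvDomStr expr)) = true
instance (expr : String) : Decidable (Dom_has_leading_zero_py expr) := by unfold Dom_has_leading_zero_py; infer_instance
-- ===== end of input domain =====

-- B is a simpler re-decomposition: one positional predicate instead of nested index-scanning loops; equal on all inputs.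

-- ===== PORT A =====
-- digit test at index k (Python expr[k].isdigit(); out-of-range default ' ' is never a digit)
def pvDAt (l : List Char) (k : Nat) : Bool := PySem.Chars.isdigit (l.getD k ' ')

-- inner `while j < len(expr) and expr[j].isdigit(): j += 1`
def pvScan (l : List Char) (j : Nat) : Nat :=
  if j < l.length && pvDAt l j then pvScan l (j + 1) else j
termination_by l.length - j
decreasing_by simp_all; omega

theorem pvScan_ge (l : List Char) (j : Nat) : j ≤ pvScan l j := by
  fun_induction pvScan with
  | case1 j h ih => omega
  | case2 j h => omega

theorem pvScan_gt (l : List Char) (j : Nat) (hj : j < l.length) (hd : pvDAt l j = true) :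
    j < pvScan l j := by
  have h := pvScan_ge l (j + 1)
  rw [pvScan]
  simp only [hj, hd, decide_true, Bool.and_self, if_true]
  omega

-- outer while loop of A, on index i
def pvLoop (l : List Char) (i : Nat) : Bool :=
  if h1 : i < l.length then
    if h2 : pvDAt l i then
      let j := pvScan l i
      let token := (l.drop i).take (j - i)      -- expr[i:j], 0 ≤ i ≤ j
      if token.length > 1 && token.getD 0 ' ' == '0' then true
      else pvLoop l j
    else pvLoop l (i + 1)
  else false
termination_by l.length - i
decreasing_by
  · have := pvScan_gt l i h1 h2; omega
  · omega

def has_leading_zero_py (expr : String) : Bool := pvLoop expr.toList 0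

-- ===== PORT B =====
-- B's positional predicate at index k (all indices are in range for k ∈ range(n-1))
def pvP (l : List Char) (k : Nat) : Bool :=
  l.getD k ' ' == '0' && pvDAt l (k + 1) && (k == 0 || !pvDAt l (k - 1))

def has_leading_zero_py_alt (expr : String) : Bool :=
  let l := expr.toList
  (List.range (l.length - 1)).any (fun k => pvP l k)

-- ===== PRECONDITION & SPEC =====
def Spec_has_leading_zero_py (expr : String) (out : Bool) : Prop := out = has_leading_zero_py_alt expr
instance (expr : String) (out : Bool) : Decidable (Spec_has_leading_zero_py expr out) := by unfold Spec_has_leading_zero_py; infer_instance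

-- ===== CLAIM (what is proved, stated in full; the proofs are below) =====
def Claim_equal_has_leading_zero_py : Prop := ∀ (expr : String), Dom_has_leading_zero_py expr → Spec_has_leading_zero_py expr (has_leading_zero_py expr)

-- ===== LEMMAS AND PROOFS =====

theorem pvDAt_oob (l : List Char) (k : Nat) (h : l.length ≤ k) : pvDAt l k = false := by
  simp [pvDAt, List.getD_eq_getElem?_getD, List.getElem?_eq_none (by omega : l.length ≤ k)]
  decide

theorem pvScan_le (l : List Char) (j : Nat) (h : j ≤ l.length) : pvScan l j ≤ l.length := by
  fun_induction pvScan with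
  | case1 j hcond ih => exact ih (by simp at hcond; omega)
  | case2 j hcond => omega

theorem pvScan_digits (l : List Char) (j : Nat) :
    ∀ m, j ≤ m → m < pvScan l j → pvDAt l m = true := by
  fun_induction pvScan with
  | case1 j h ih =>
    intro m hm1 hm2
    rcases Nat.eq_or_lt_of_le hm1 with rfl | hlt
    · exact (Bool.and_eq_true _ _ |>.mp h).2
    · exact ih m hlt hm2
  | case2 j h => intro m hm1 hm2; omega

theorem pvScan_end (l : List Char) (j : Nat) : pvDAt l (pvScan l j) = false := by
  fun_induction pvScan with
  | case1 j h ih => exact ih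
  | case2 j h =>
    by_cases hj : j < l.length
    · simp [hj] at h; exact h
    · exact pvDAt_oob l j (by omega)

-- '0' is a digit, so a position holding '0' satisfies pvDAt
theorem pvDAt_of_zero (l : List Char) (k : Nat) (h : l.getD k ' ' = '0') :
    pvDAt l k = true := by
  unfold pvDAt
  rw [h]
  decide

-- main invariant: A's outer loop from a position that is not strictly inside a digit run
-- returns true iff some position k ≥ i satisfies B's predicate
theorem pvLoop_iff (l : List Char) (m : Nat) : ∀ i, l.length - i ≤ m →
    (i = 0 ∨ pvDAt l (i - 1) = false ∨ pvDAt l i = false) →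
    (pvLoop l i = true ↔ ∃ k, i ≤ k ∧ k + 1 < l.length ∧ pvP l k = true) := by
  induction m with
  | zero =>
    intro i hm _
    rw [pvLoop]
    have h1 : ¬ i < l.length := by omega
    simp [h1]
    intro k hk hk2
    omega
  | succ m ih =>
    intro i hm hinv
    by_cases h1 : i < l.length
    · by_cases h2 : pvDAt l i = true
      · rw [pvLoop, dif_pos h1, dif_pos h2]
        set j := pvScan l i with hj
        have hji : i < j := pvScan_gt l i h1 h2
        have hjn : j ≤ l.length := pvScan_le l i (by omega)
        have htok : ((l.drop i).take (j - i)).length = j - i := by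
          simp; omega
        have htok0 : ((l.drop i).take (j - i)).getD 0 ' ' = l.getD i ' ' := by
          have h0 : 0 < j - i := by omega
          simp [List.getD_eq_getElem?_getD, h0, h1]
        simp only [htok, htok0]
        by_cases hc : (decide ((j : ℕ) - i > 1) && (l.getD i ' ' == '0')) = true
        · -- found: position i witnesses B's predicate
          rw [if_pos hc]
          simp only [Bool.and_eq_true, decide_eq_true_eq, beq_iff_eq] at hc
          simp only [true_iff]
          refine ⟨i, le_refl i, by omega, ?_⟩
          have hd1 : pvDAt l (i + 1) = true := pvScan_digits l i (i + 1) (by omega) (by omega)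
          simp only [pvP, hd1, Bool.and_eq_true, Bool.or_eq_true, Bool.not_eq_true',
            beq_iff_eq, and_true]
          refine ⟨hc.2, ?_⟩
          rcases hinv with h0 | hprev | hcur
          · exact Or.inl (by simpa using h0)
          · exact Or.inr hprev
          · rw [h2] at hcur; exact absurd hcur (by simp)
        · rw [if_neg hc]
          simp only [Bool.and_eq_true, decide_eq_true_eq, beq_iff_eq, not_and] at hc
          have hinv' : j = 0 ∨ pvDAt l (j - 1) = false ∨ pvDAt l j = false := by
            right; right; rw [hj]; exact pvScan_end l i
          rw [ih j (by omega) hinv']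
          constructor
          · rintro ⟨k, hk1, hk2, hk3⟩; exact ⟨k, by omega, hk2, hk3⟩
          · rintro ⟨k, hk1, hk2, hk3⟩
            refine ⟨k, ?_, hk2, hk3⟩
            by_contra hklt
            simp only [not_le] at hklt
            -- k ∈ [i, j) cannot satisfy pvP
            simp only [pvP, Bool.and_eq_true, Bool.or_eq_true, Bool.not_eq_true',
              beq_iff_eq] at hk3
            obtain ⟨⟨hz, hnext⟩, hprev⟩ := hk3
            rcases Nat.eq_or_lt_of_le hk1 with rfl | hik
            · -- k = i: then the run has length > 1 and starts with '0', contradicting hc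
              have hnj : i + 1 < j := by
                rcases Nat.lt_or_ge (i + 1) j with h | h
                · exact h
                · have hcase : i + 1 = j ∨ j < i + 1 := by omega
                  rcases hcase with heq | hh
                  · rw [heq, hj] at hnext
                    rw [pvScan_end l i] at hnext; exact absurd hnext (by simp)
                  · omega
              exact absurd hz (by simpa using hc (by omega))
            · -- i < k < j: l[k-1] is inside the digit run, hence a digit
              have hkd : pvDAt l (k - 1) = true :=
                pvScan_digits l i (k - 1) (by omega) (by omega)
              rcases hprev with h0 | hnd
              · omega
              · rw [hkd] at hnd; exact absurd hnd (by simp)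
      · -- current char not a digit: step to i+1
        rw [pvLoop, dif_pos h1, dif_neg h2]
        have h2' : pvDAt l i = false := by simpa using h2
        rw [ih (i + 1) (by omega) (by right; left; simpa using h2')]
        constructor
        · rintro ⟨k, hk1, hk2, hk3⟩; exact ⟨k, by omega, hk2, hk3⟩
        · rintro ⟨k, hk1, hk2, hk3⟩
          refine ⟨k, ?_, hk2, hk3⟩
          rcases Nat.eq_or_lt_of_le hk1 with rfl | h
          · simp only [pvP, Bool.and_eq_true, beq_iff_eq] at hk3
            have hdk := pvDAt_of_zero l i hk3.1.1
            rw [h2'] at hdk; exact absurd hdk (by simp)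
          · omega
    · rw [pvLoop, dif_neg h1]
      simp only [Bool.false_eq_true, false_iff]
      rintro ⟨k, hk1, hk2, _⟩
      omega

-- ===== VERDICT (by name: the statement is the Claim_ definition above) =====
theorem has_leading_zero_py_spec : Claim_equal_has_leading_zero_py := by
  intro expr _
  show has_leading_zero_py expr = has_leading_zero_py_alt expr
  show pvLoop expr.toList 0 = (List.range (expr.toList.length - 1)).any (fun k => pvP expr.toList k)
  rw [Bool.eq_iff_iff]
  rw [pvLoop_iff expr.toList expr.toList.length 0 (by omega) (Or.inl rfl)]
  simp only [List.any_eq_true, List.mem_range]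
  constructor
  · rintro ⟨k, _, hk2, hk3⟩; exact ⟨k, by omega, hk3⟩
  · rintro ⟨k, hk1, hk2⟩; exact ⟨k, by omega, by omega, hk2⟩
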